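-- pv_equiv track=rewrite | github.com/Mnb24/MBAnalysis | Compare2.py | print_colored_diff
-- ===== SOURCE A (Python) =====
-- def print_colored_diff(line):
--     sentence1 = []
--     sentence2 = []
--
--     for code, word in line:
--         if code == ' ':
--             sentence1.append(word)
--             sentence2.append(word)
--         elif code == '-':
--             sentence1.append(f'<span style="color: blue">{word}</span>')
--         elif code == '+':
--             sentence2.append(f'<span style="color: red">{word}</span>')
--
--     sentence1 = ' '.join(sentence1)
--     sentence2 = ' '.join(sentence2)
--
--     return sentence1, sentence2
-- ===== SOURCE B (Python) =====
-- def print_colored_diff(line):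
--     # Backward scan: build each final sentence string directly (no word lists,
--     # no join); None marks "no words yet" so separators are exact.
--     s1 = None
--     s2 = None
--     for code, word in reversed(line):
--         if code == ' ':
--             s1 = word if s1 is None else word + ' ' + s1
--             s2 = word if s2 is None else word + ' ' + s2
--         elif code == '-':
--             w = '<span style="color: blue">' + word + '</span>'
--             s1 = w if s1 is None else w + ' ' + s1
--         elif code == '+':
--             w = '<span style="color: red">' + word + '</span>'
--             s2 = w if s2 is None else w + ' ' + s2
--     return ('' if s1 is None else s1, '' if s2 is None else s2)
-- ===== Notes on version B (the rewrite author's own statement) =====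
-- stated objective: alternative
-- what changed: Instead of accumulating two word lists forward and joining them at the end, B scans the line back-to-front and builds each finished sentence string directly, threading a None sentinel to place the separators, so no intermediate lists and no join exist.
import Mathlib
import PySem

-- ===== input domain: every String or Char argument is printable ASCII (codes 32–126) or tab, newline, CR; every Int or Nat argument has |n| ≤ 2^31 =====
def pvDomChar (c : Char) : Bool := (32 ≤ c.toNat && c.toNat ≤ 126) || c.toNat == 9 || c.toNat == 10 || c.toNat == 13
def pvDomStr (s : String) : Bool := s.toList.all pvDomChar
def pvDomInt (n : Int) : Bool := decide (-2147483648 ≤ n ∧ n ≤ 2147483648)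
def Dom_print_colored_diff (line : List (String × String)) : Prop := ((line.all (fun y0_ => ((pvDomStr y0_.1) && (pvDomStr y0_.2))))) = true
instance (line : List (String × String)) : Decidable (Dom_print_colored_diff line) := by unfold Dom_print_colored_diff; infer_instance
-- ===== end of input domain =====

-- B replaces A's forward loop with two word-list accumulators plus a final join
-- by a backward scan that builds each finished sentence string directly with a
-- none-sentinel for the separator; same outputs, objective: alternative.

-- ===== PORT A =====
-- A's loop: one forward pass, branching on the code, appending to two lists.
def pvLoopA : List (String × String) → List String → List String → List String × List String
  | [], s1, s2 => (s1, s2)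
  | (code, word) :: rest, s1, s2 =>
    if code == " " then pvLoopA rest (s1 ++ [word]) (s2 ++ [word])
    else if code == "-" then
      pvLoopA rest (s1 ++ ["<span style=\"color: blue\">" ++ word ++ "</span>"]) s2
    else if code == "+" then
      pvLoopA rest s1 (s2 ++ ["<span style=\"color: red\">" ++ word ++ "</span>"])
    else pvLoopA rest s1 s2

def print_colored_diff (line : List (String × String)) : String × String :=
  let p := pvLoopA line [] []
  (PySem.Str.join " " p.1, PySem.Str.join " " p.2)

-- ===== PORT B =====
-- w prepended to an optional already-built suffix ('w' / 'w + " " + s1').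
def pvPrepend (w : String) : Option String → String
  | none => w
  | some r => w ++ " " ++ r

-- one step of B's backward loop (the body of 'for code, word in reversed(line)')
def pvStepB (acc : Option String × Option String) (p : String × String) :
    Option String × Option String :=
  if p.1 == " " then (some (pvPrepend p.2 acc.1), some (pvPrepend p.2 acc.2))
  else if p.1 == "-" then
    (some (pvPrepend ("<span style=\"color: blue\">" ++ p.2 ++ "</span>") acc.1), acc.2)
  else if p.1 == "+" then
    (acc.1, some (pvPrepend ("<span style=\"color: red\">" ++ p.2 ++ "</span>") acc.2))
  else acc

def print_colored_diff_alt (line : List (String × String)) : String × String :=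
  let r := line.reverse.foldl pvStepB (none, none)
  (r.1.getD "", r.2.getD "")

-- ===== PRECONDITION & SPEC =====
def Spec_print_colored_diff (line : List (String × String)) (out : String × String) : Prop := out = print_colored_diff_alt line
instance (line : List (String × String)) (out : String × String) : Decidable (Spec_print_colored_diff line out) := by unfold Spec_print_colored_diff; infer_instance

-- ===== CLAIM =====
def Claim_equal_print_colored_diff : Prop := ∀ (line : List (String × String)), Dom_print_colored_diff line → Spec_print_colored_diff line (print_colored_diff line)

-- ===== LEMMAS AND PROOFS =====
-- the sentence-1 / sentence-2 word lists A accumulates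
def pvList1 (line : List (String × String)) : List String :=
  (line.filter (fun p => p.1 == " " || p.1 == "-")).map
    (fun p => if p.1 == " " then p.2
              else "<span style=\"color: blue\">" ++ p.2 ++ "</span>")
def pvList2 (line : List (String × String)) : List String :=
  (line.filter (fun p => p.1 == " " || p.1 == "+")).map
    (fun p => if p.1 == " " then p.2
              else "<span style=\"color: red\">" ++ p.2 ++ "</span>")

-- optional join: none for no words, the joined sentence otherwise
def pvOptJ : List String → Option String
  | [] => none
  | w :: ws => some (pvPrepend w (pvOptJ ws))

theorem pvLoopA_eq (line : List (String × String)) :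
    ∀ s1 s2, pvLoopA line s1 s2 = (s1 ++ pvList1 line, s2 ++ pvList2 line) := by
  induction line with
  | nil => intro s1 s2; simp [pvLoopA, pvList1, pvList2]
  | cons hd tl ih =>
    intro s1 s2
    obtain ⟨code, word⟩ := hd
    by_cases h1 : code = " "
    · simp [pvLoopA, pvList1, pvList2, h1, ih]
    · by_cases h2 : code = "-"
      · simp [pvLoopA, pvList1, pvList2, h2, ih]
      · by_cases h3 : code = "+"
        · simp [pvLoopA, pvList1, pvList2, h3, ih]
        · simp [pvLoopA, pvList1, pvList2, h1, h2, h3, ih]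

theorem pvOfList_space_cons (l : List Char) :
    String.ofList (' ' :: l) = " " ++ String.ofList l := by
  rw [show (' ' :: l) = [' '] ++ l from rfl, String.ofList_append]

theorem pvJoin_cons_cons (w v : String) (ws : List String) :
    PySem.Str.join " " (w :: v :: ws) = w ++ " " ++ PySem.Str.join " " (v :: ws) := by
  simp [PySem.Str.join, PySem.Chars.join, List.intercalate, String.ofList_append,
    List.flatten, pvOfList_space_cons, String.append_assoc]

theorem pvJoin_eq_optJ (l : List String) :
    PySem.Str.join " " l = (pvOptJ l).getD "" := by
  induction l with
  | nil => rfl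
  | cons w ws ih =>
    cases ws with
    | nil => simp [PySem.Str.join, PySem.Chars.join, List.intercalate, pvOptJ, pvPrepend]
    | cons v vs =>
      rw [pvJoin_cons_cons, ih]
      simp [pvOptJ, pvPrepend]

theorem pvFoldB_eq (line : List (String × String)) :
    line.reverse.foldl pvStepB (none, none) = (pvOptJ (pvList1 line), pvOptJ (pvList2 line)) := by
  rw [List.foldl_reverse]
  induction line with
  | nil => simp [pvList1, pvList2, pvOptJ]
  | cons hd tl ih =>
    obtain ⟨code, word⟩ := hd
    simp only [List.foldr_cons, ih]
    by_cases h1 : code = " "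
    · simp [pvStepB, pvList1, pvList2, pvOptJ, h1]
    · by_cases h2 : code = "-"
      · simp [pvStepB, pvList1, pvList2, pvOptJ, h2]
      · by_cases h3 : code = "+"
        · simp [pvStepB, pvList1, pvList2, pvOptJ, h3]
        · simp [pvStepB, pvList1, pvList2, h1, h2, h3]

-- ===== VERDICT =====
theorem print_colored_diff_spec : Claim_equal_print_colored_diff := by
  intro line _
  unfold Spec_print_colored_diff print_colored_diff print_colored_diff_alt
  rw [pvFoldB_eq, pvLoopA_eq]
  simp [pvJoin_eq_optJ]
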